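-- pv_equiv track=rewrite | github.com/davidlarrimore/curatore-v2 | scripts/sharepoint/sharepoint_process_with_summary.py | _fallback_inventory_markdown
-- ===== SOURCE A (Python) =====
-- from typing import Any, Dict, List, Tuple
--
-- def _fallback_inventory_markdown(inventory: Dict[str, Any]) -> str:
--     items = inventory.get("items", [])
--     by_folder: Dict[str, List[Dict[str, Any]]] = {}
--     for item in items:
--         folder = item.get("folder", "/")
--         by_folder.setdefault(folder, []).append(item)
--     lines = ["# SharePoint Inventory", ""]
--     for folder in sorted(by_folder.keys()):
--         lines.append(f"## {folder}")
--         lines.append("")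
--         for entry in by_folder[folder]:
--             lines.append(f"- {entry.get('name', '')}")
--             if entry.get("summary"):
--                 lines.append(f"  - Summary: {entry.get('summary')}")
--             if entry.get("web_url"):
--                 lines.append(f"  - Link: {entry.get('web_url')}")
--             if entry.get("last_updated"):
--                 lines.append(f"  - Last updated: {entry.get('last_updated')}")
--         lines.append("")
--     return "\n".join(lines)
-- ===== SOURCE B (Python) =====
-- from typing import Any, Dict, List, Tuple
--
-- def _entry_lines(entry: Dict[str, Any]) -> List[str]:
--     out = [f"- {entry.get('name', '')}"]
--     if entry.get("summary"):
--         out.append(f"  - Summary: {entry.get('summary')}")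
--     if entry.get("web_url"):
--         out.append(f"  - Link: {entry.get('web_url')}")
--     if entry.get("last_updated"):
--         out.append(f"  - Last updated: {entry.get('last_updated')}")
--     return out
--
-- def _fallback_inventory_markdown(inventory: Dict[str, Any]) -> str:
--     items = inventory.get("items", [])
--     ordered = sorted(items, key=lambda it: it.get("folder", "/"))
--     lines = ["# SharePoint Inventory", ""]
--     i, n = 0, len(ordered)
--     while i < n:
--         folder = ordered[i].get("folder", "/")
--         lines.append(f"## {folder}")
--         lines.append("")
--         while i < n and ordered[i].get("folder", "/") == folder:
--             lines.extend(_entry_lines(ordered[i]))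
--             i += 1
--         lines.append("")
--     return "\n".join(lines)
-- ===== Notes on version B (the rewrite author's own statement) =====
-- stated objective: idiomatic
-- what changed: B replaces A's grouping dict (setdefault/append) plus sorted(keys) lookup pass by a stable sort of the items on the folder key followed by a single scan emitting consecutive equal-folder groups; no intermediate dict is built.
import Mathlib
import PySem

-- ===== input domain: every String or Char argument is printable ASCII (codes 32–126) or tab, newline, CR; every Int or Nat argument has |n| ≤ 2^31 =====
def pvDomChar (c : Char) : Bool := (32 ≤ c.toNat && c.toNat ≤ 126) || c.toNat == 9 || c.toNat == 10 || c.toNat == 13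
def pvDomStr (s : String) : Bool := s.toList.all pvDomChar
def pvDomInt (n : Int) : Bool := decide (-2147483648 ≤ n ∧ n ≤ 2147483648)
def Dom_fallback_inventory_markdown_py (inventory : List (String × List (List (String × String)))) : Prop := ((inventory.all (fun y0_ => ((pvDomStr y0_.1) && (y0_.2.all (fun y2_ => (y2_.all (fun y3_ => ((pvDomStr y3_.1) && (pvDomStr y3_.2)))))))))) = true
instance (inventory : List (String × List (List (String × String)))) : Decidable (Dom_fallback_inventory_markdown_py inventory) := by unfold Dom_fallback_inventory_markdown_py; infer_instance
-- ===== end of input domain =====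

-- B replaces A's grouping dict + sorted(keys) pass by a stable sort on the folder key
-- followed by a single scan over consecutive equal-folder groups (objective: idiomatic).

-- Python truthiness of entry.get(k) (None or "" are falsy) — used by both Pythons verbatim
def pyTruthyStr? (o : Option String) : Bool :=
  match o with
  | none => false
  | some s => !(s == "")

-- ===== PORT A =====
def fallback_inventory_markdown_py (inventory : List (String × List (List (String × String)))) : String :=
  let items := (PySem.Dict.mk inventory).getD "items" []
  let by_folder := items.foldl
    (fun d item => d.modify ((PySem.Dict.mk item).getD "folder" "/") [] (fun l => l ++ [item]))
    PySem.Dict.empty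
  let lines := ["# SharePoint Inventory", ""]
  let lines := (PySem.List.sorted by_folder.keys (fun k => k)).foldl (fun lines folder =>
    let lines := lines ++ ["## " ++ folder]
    let lines := lines ++ [""]
    let lines := (by_folder.getD folder []).foldl (fun lines entry =>
      let lines := lines ++ ["- " ++ (PySem.Dict.mk entry).getD "name" ""]
      let lines := if pyTruthyStr? ((PySem.Dict.mk entry).get? "summary") then
          lines ++ ["  - Summary: " ++ ((PySem.Dict.mk entry).get? "summary").getD ""] else lines
      let lines := if pyTruthyStr? ((PySem.Dict.mk entry).get? "web_url") then
          lines ++ ["  - Link: " ++ ((PySem.Dict.mk entry).get? "web_url").getD ""] else lines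
      let lines := if pyTruthyStr? ((PySem.Dict.mk entry).get? "last_updated") then
          lines ++ ["  - Last updated: " ++ ((PySem.Dict.mk entry).get? "last_updated").getD ""] else lines
      lines) lines
    lines ++ [""]) lines
  PySem.Str.join "\n" lines

-- ===== PORT B =====
-- helper _entry_lines of Source B
def entryLines (entry : List (String × String)) : List String :=
  let out := ["- " ++ (PySem.Dict.mk entry).getD "name" ""]
  let out := if pyTruthyStr? ((PySem.Dict.mk entry).get? "summary") then
      out ++ ["  - Summary: " ++ ((PySem.Dict.mk entry).get? "summary").getD ""] else out
  let out := if pyTruthyStr? ((PySem.Dict.mk entry).get? "web_url") then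
      out ++ ["  - Link: " ++ ((PySem.Dict.mk entry).get? "web_url").getD ""] else out
  let out := if pyTruthyStr? ((PySem.Dict.mk entry).get? "last_updated") then
      out ++ ["  - Last updated: " ++ ((PySem.Dict.mk entry).get? "last_updated").getD ""] else out
  out

-- it.get("folder", "/") — the sort/group key of Source B
def folderOf (item : List (String × String)) : String :=
  (PySem.Dict.mk item).getD "folder" "/"

-- the two nested while loops of Source B: scan the sorted list group by consecutive equal folder
def emitGroups : List (List (String × String)) → List String
  | [] => []
  | x :: rest =>
    let folder := folderOf x
    (["## " ++ folder, ""]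
        ++ (x :: rest.takeWhile (fun it => folderOf it == folder)).flatMap entryLines
        ++ [""])
      ++ emitGroups (rest.dropWhile (fun it => folderOf it == folder))
termination_by l => l.length
decreasing_by
  simpa using Nat.lt_succ_of_le (List.length_dropWhile_le _ rest)

def fallback_inventory_markdown_py_alt (inventory : List (String × List (List (String × String)))) : String :=
  let items := (PySem.Dict.mk inventory).getD "items" []
  let ordered := PySem.List.sorted items (fun it => folderOf it)
  PySem.Str.join "\n" (["# SharePoint Inventory", ""] ++ emitGroups ordered)

-- ===== PRECONDITION & SPEC =====
def Spec_fallback_inventory_markdown_py (inventory : List (String × List (List (String × String)))) (out : String) : Prop := out = fallback_inventory_markdown_py_alt inventory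
instance (inventory : List (String × List (List (String × String)))) (out : String) : Decidable (Spec_fallback_inventory_markdown_py inventory out) := by unfold Spec_fallback_inventory_markdown_py; infer_instance

-- ===== CLAIM (what is proved, stated in full; the proofs are below) =====
def Claim_equal_fallback_inventory_markdown_py : Prop := ∀ (inventory : List (String × List (List (String × String)))), Dom_fallback_inventory_markdown_py inventory → Spec_fallback_inventory_markdown_py inventory (fallback_inventory_markdown_py inventory)

-- ===== LEMMAS AND PROOFS =====

-- the canonical middle form both ports are reduced to
def canonBlock (items : List (List (String × String))) (c : String) : List String :=
  ["## " ++ c, ""] ++ (items.filter (fun it => folderOf it == c)).flatMap entryLines ++ [""]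

def canon (items : List (List (String × String))) : List String :=
  ["# SharePoint Inventory", ""]
    ++ (PySem.List.sorted (PySem.Set.ofList (items.map folderOf)) (fun k => k)).flatMap
         (fun c => canonBlock items c)

theorem set_update_nil {α : Type} [BEq α] (xs : List α) :
    PySem.Set.update ([] : PySem.Set α) xs = PySem.Set.ofList xs := by
  rw [PySem.Set.ofList_eq_foldl]; rfl

theorem flatMap_congr_mem {α β : Type} {l : List α} {f g : α → List β}
    (h : ∀ x ∈ l, f x = g x) : l.flatMap f = l.flatMap g := by
  induction l with
  | nil => rfl
  | cons x xs ih =>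
    rw [List.flatMap_cons, List.flatMap_cons, h x (by simp),
      ih (fun y hy => h y (by simp [hy]))]

-- A's grouping loop and inner entry loop, named so the rfl-step below can talk about them
def groupA (items : List (List (String × String))) :
    PySem.Dict String (List (List (String × String))) :=
  items.foldl (fun d item => d.modify (folderOf item) [] (fun l => l ++ [item]))
    PySem.Dict.empty

def stepEntryA (lines : List String) (entry : List (String × String)) : List String :=
  let lines := lines ++ ["- " ++ (PySem.Dict.mk entry).getD "name" ""]
  let lines := if pyTruthyStr? ((PySem.Dict.mk entry).get? "summary") then
      lines ++ ["  - Summary: " ++ ((PySem.Dict.mk entry).get? "summary").getD ""] else lines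
  let lines := if pyTruthyStr? ((PySem.Dict.mk entry).get? "web_url") then
      lines ++ ["  - Link: " ++ ((PySem.Dict.mk entry).get? "web_url").getD ""] else lines
  let lines := if pyTruthyStr? ((PySem.Dict.mk entry).get? "last_updated") then
      lines ++ ["  - Last updated: " ++ ((PySem.Dict.mk entry).get? "last_updated").getD ""] else lines
  lines

theorem stepEntryA_eq : stepEntryA = fun lines entry => lines ++ entryLines entry := by
  funext lines entry
  simp only [stepEntryA, entryLines]
  split_ifs <;> simp

theorem keys_groupA (items : List (List (String × String))) :
    (groupA items).keys = PySem.Set.ofList (items.map folderOf) := by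
  unfold groupA
  rw [PySem.Dict.keys_foldl_modify_key items folderOf [] (fun _ item l => l ++ [item]),
    PySem.Dict.keys_empty, set_update_nil]

theorem getD_group_fold {α : Type} (key : α → String) (c : String) :
    ∀ (l : List α) (d : PySem.Dict String (List α)),
    (l.foldl (fun d x => d.modify (key x) [] (fun ls => ls ++ [x])) d).getD c []
      = d.getD c [] ++ l.filter (fun x => key x == c) := by
  intro l
  induction l with
  | nil => intro d; simp
  | cons a l ih =>
    intro d
    rw [List.foldl_cons, ih, List.filter_cons, PySem.Dict.getD_modify]
    by_cases h : c = key a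
    · simp [h, List.append_assoc]
    · have hf : (key a == c) = false := by simp [Ne.symm h]
      simp [h, hf]

theorem getD_groupA (items : List (List (String × String))) (c : String) :
    (groupA items).getD c [] = items.filter (fun it => folderOf it == c) := by
  unfold groupA
  rw [getD_group_fold, PySem.Dict.getD_empty]
  rfl

theorem foldl_outer {κ : Type} (ks : List κ) (acc : List String)
    (h2 f3 : κ → List String) :
    ks.foldl (fun lines k => (lines ++ h2 k ++ [""] ++ f3 k) ++ [""]) acc
      = acc ++ ks.flatMap (fun k => h2 k ++ [""] ++ f3 k ++ [""]) := by
  induction ks generalizing acc with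
  | nil => simp
  | cons k ks ih => simp [List.foldl_cons, List.append_assoc, List.flatMap_def]

theorem a_canon (inventory : List (String × List (List (String × String)))) :
    fallback_inventory_markdown_py inventory
      = PySem.Str.join "\n" (canon ((PySem.Dict.mk inventory).getD "items" [])) := by
  have h0 : fallback_inventory_markdown_py inventory
      = PySem.Str.join "\n"
          ((PySem.List.sorted (groupA ((PySem.Dict.mk inventory).getD "items" [])).keys
              (fun k => k)).foldl
            (fun lines folder =>
              (((groupA ((PySem.Dict.mk inventory).getD "items" [])).getD folder []).foldl
                  stepEntryA (lines ++ ["## " ++ folder] ++ [""])) ++ [""])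
            ["# SharePoint Inventory", ""]) := rfl
  rw [h0, stepEntryA_eq]
  simp only [PySem.List.foldl_append_eq_flatMap, keys_groupA, getD_groupA]
  rw [foldl_outer]
  simp [canon, canonBlock]

theorem filter_insertBy {α κ : Type} [LinearOrder κ] [BEq κ] [LawfulBEq κ]
    (key : α → κ) (c : κ) (x : α) (ys : List α)
    (h : ys.Pairwise (fun a b => key a ≤ key b)) :
    (PySem.List.insertBy (fun a b => decide (key a < key b)) x ys).filter
        (fun y => key y == c)
      = ys.filter (fun y => key y == c) ++ (if key x == c then [x] else []) := by
  induction ys with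
  | nil =>
    by_cases hc : key x = c <;> simp [PySem.List.insertBy, hc]
  | cons y ys ih =>
    rw [PySem.List.insertBy]
    by_cases hlt : key x < key y
    · rw [if_pos (by simp [hlt])]
      by_cases hc : key x = c
      · have hnil : (y :: ys).filter (fun y => key y == c) = [] := by
          rw [List.filter_eq_nil_iff]
          intro z hz
          have hyz : key y ≤ key z := by
            rcases List.mem_cons.mp hz with hz | hz
            · exact hz ▸ le_refl _
            · exact (List.pairwise_cons.mp h).1 z hz
          have : c < key z := lt_of_lt_of_le (hc ▸ hlt) hyz
          simp [ne_of_gt this]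
        simp [hnil, hc]
      · simp [List.filter_cons, hc]
    · rw [if_neg (by simp [hlt])]
      rw [List.filter_cons, List.filter_cons, ih (List.pairwise_cons.mp h).2]
      split <;> simp

theorem filter_sorted_key {α κ : Type} [LinearOrder κ] [BEq κ] [LawfulBEq κ]
    (items : List α) (key : α → κ) (c : κ) :
    (PySem.List.sorted items key).filter (fun it => key it == c)
      = items.filter (fun it => key it == c) := by
  induction items using List.reverseRecOn with
  | nil => simp [PySem.List.sorted_eq_foldl_insertBy]
  | append_singleton l x ih =>
    have hstep : PySem.List.sorted (l ++ [x]) key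
        = PySem.List.insertBy (fun a b => decide (key a < key b)) x
            (PySem.List.sorted l key) := by
      rw [PySem.List.sorted_eq_foldl_insertBy, List.foldl_append,
        ← PySem.List.sorted_eq_foldl_insertBy]
      rfl
    rw [hstep, filter_insertBy key c x _ (PySem.List.sorted_pairwise l key),
      ih, List.filter_append]
    simp [List.filter_cons]

theorem b_canon_scan_aux :
    ∀ (n : Nat) (s : List (List (String × String))), s.length ≤ n →
      s.Pairwise (fun a b => folderOf a ≤ folderOf b) →
      emitGroups s
        = (PySem.List.sorted (PySem.Set.ofList (s.map folderOf)) (fun k => k)).flatMap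
            (canonBlock s) := by
  intro n
  induction n with
  | zero =>
    intro s hs _
    rw [List.eq_nil_of_length_eq_zero (Nat.le_zero.mp hs)]
    rw [emitGroups]
    rfl
  | succ n ih =>
    intro s hs hp
    cases s with
    | nil => rw [emitGroups]; rfl
    | cons x rest =>
      have hxrest : ∀ y ∈ rest, folderOf x ≤ folderOf y :=
        (List.pairwise_cons.mp hp).1
      have hprest : rest.Pairwise (fun a b => folderOf a ≤ folderOf b) :=
        (List.pairwise_cons.mp hp).2
      set c0 := folderOf x with hc0
      set p : List (String × String) → Bool := fun it => folderOf it == c0 with hpdef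
      set t := rest.takeWhile p with htdef
      set d := rest.dropWhile p with hddef
      have htd : t ++ d = rest := List.takeWhile_append_dropWhile
      have ht_all : ∀ it ∈ t, folderOf it = c0 := by
        intro it hit
        have := List.mem_takeWhile_imp hit
        rw [hpdef] at this
        exact beq_iff_eq.mp this
      have hd_pair : d.Pairwise (fun a b => folderOf a ≤ folderOf b) :=
        hprest.sublist (List.dropWhile_sublist p)
      have hd_rest : ∀ it ∈ d, it ∈ rest := fun it h =>
        (List.dropWhile_sublist p).subset h
      have hd_gt : ∀ it ∈ d, c0 < folderOf it := by
        cases hd : d with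
        | nil => simp
        | cons y0 d' =>
          have hh := List.head?_dropWhile_not p rest
          rw [← hddef, hd] at hh
          simp only [List.head?_cons] at hh
          have hy0ne : folderOf y0 ≠ c0 := by
            intro he
            rw [hpdef] at hh
            simp [he] at hh
          have hy0mem : y0 ∈ d := by rw [hd]; exact List.mem_cons_self
          have hy0 : c0 < folderOf y0 :=
            lt_of_le_of_ne (hxrest y0 (hd_rest y0 hy0mem)) (Ne.symm hy0ne)
          intro it hit
          rcases List.mem_cons.mp hit with rfl | hit'
          · exact hy0
          · refine lt_of_lt_of_le hy0 ?_
            have := hd_pair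
            rw [hd] at this
            exact (List.pairwise_cons.mp this).1 it hit'
      have hfilter_c0 : (x :: rest).filter (fun it => folderOf it == c0) = x :: t := by
        rw [List.filter_cons, ← htd, List.filter_append]
        have h1 : t.filter (fun it => folderOf it == c0) = t :=
          List.filter_eq_self.mpr (fun a ha => by simp [ht_all a ha])
        have h2 : d.filter (fun it => folderOf it == c0) = [] :=
          List.filter_eq_nil_iff.mpr (fun a ha => by simp [ne_of_gt (hd_gt a ha)])
        simp only [← hc0]
        simp [h1, h2]
      have hfilter_ne : ∀ c, c ≠ c0 →
          (x :: rest).filter (fun it => folderOf it == c)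
            = d.filter (fun it => folderOf it == c) := by
        intro c hc
        rw [List.filter_cons, ← htd, List.filter_append]
        have h1 : t.filter (fun it => folderOf it == c) = [] :=
          List.filter_eq_nil_iff.mpr (fun a ha => by
            simp only [ht_all a ha, beq_iff_eq]
            exact fun h => hc h.symm)
        have hx : (folderOf x == c) = false := by
          rw [← hc0]
          exact beq_eq_false_iff_ne.mpr (fun h => hc h.symm)
        simp [h1, hx]
      have hkeys : PySem.List.sorted (PySem.Set.ofList ((x :: rest).map folderOf))
            (fun k => k)
          = c0 :: PySem.List.sorted (PySem.Set.ofList (d.map folderOf)) (fun k => k) := by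
        apply PySem.List.sorted_eq_of_perm_of_pairwise_lt
        · rw [List.perm_ext_iff_of_nodup]
          · intro a
            simp only [List.mem_cons, PySem.List.mem_sorted, PySem.Set.mem_ofList,
              List.mem_map, List.map_cons, ← htd, List.map_append, List.mem_append]
            constructor
            · rintro (rfl | ⟨it, hit, rfl⟩)
              · exact Or.inl rfl
              · exact Or.inr (Or.inr ⟨it, hit, rfl⟩)
            · rintro (rfl | (⟨it, hit, rfl⟩ | ⟨it, hit, rfl⟩))
              · exact Or.inl rfl
              · exact Or.inl (ht_all it hit)
              · exact Or.inr ⟨it, hit, rfl⟩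
          · rw [List.nodup_cons]
            constructor
            · intro hmem
              rw [PySem.List.mem_sorted, PySem.Set.mem_ofList] at hmem
              rcases List.mem_map.mp hmem with ⟨it, hit, he⟩
              exact absurd he (hd_gt it hit).ne'
            · exact ((PySem.List.sorted_perm _ _ _).nodup_iff).mpr
                (PySem.Set.nodup_ofList _)
          · exact PySem.Set.nodup_ofList _
        · rw [List.pairwise_cons]
          refine ⟨?_, PySem.List.sorted_ofList_pairwise_lt _⟩
          intro b hb
          rw [PySem.List.mem_sorted, PySem.Set.mem_ofList] at hb
          rcases List.mem_map.mp hb with ⟨it, hit, rfl⟩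
          exact hd_gt it hit
      rw [emitGroups]
      simp only [← hc0, ← hpdef, ← htdef, ← hddef]
      have hlen : d.length ≤ n := by
        have h1 : d.length ≤ rest.length := List.length_dropWhile_le p rest
        have h2 : rest.length ≤ n := by
          simp only [List.length_cons] at hs
          omega
        omega
      rw [ih d hlen hd_pair, hkeys, List.flatMap_cons]
      congr 1
      · unfold canonBlock
        rw [hfilter_c0]
        simp
      · apply flatMap_congr_mem
        intro c hcmem
        have hcne : c ≠ c0 := by
          rw [PySem.List.mem_sorted, PySem.Set.mem_ofList] at hcmem
          rcases List.mem_map.mp hcmem with ⟨it, hit, rfl⟩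
          exact (hd_gt it hit).ne'
        unfold canonBlock
        rw [hfilter_ne c hcne]

theorem b_canon_scan (s : List (List (String × String)))
    (h : s.Pairwise (fun a b => folderOf a ≤ folderOf b)) :
    emitGroups s
      = (PySem.List.sorted (PySem.Set.ofList (s.map folderOf)) (fun k => k)).flatMap
          (canonBlock s) :=
  b_canon_scan_aux s.length s (le_refl _) h

theorem b_canon (inventory : List (String × List (List (String × String)))) :
    fallback_inventory_markdown_py_alt inventory
      = PySem.Str.join "\n" (canon ((PySem.Dict.mk inventory).getD "items" [])) := by
  have h0 : fallback_inventory_markdown_py_alt inventory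
      = PySem.Str.join "\n" (["# SharePoint Inventory", ""]
          ++ emitGroups (PySem.List.sorted
              ((PySem.Dict.mk inventory).getD "items" []) folderOf)) := rfl
  set items := (PySem.Dict.mk inventory).getD "items" [] with hitems
  rw [h0, b_canon_scan _ (PySem.List.sorted_pairwise items folderOf)]
  have hkeys : PySem.List.sorted
        (PySem.Set.ofList ((PySem.List.sorted items folderOf).map folderOf)) (fun k => k)
      = PySem.List.sorted (PySem.Set.ofList (items.map folderOf)) (fun k => k) := by
    apply PySem.List.sorted_eq_sorted_of_perm _ _ _ (fun a b h => h)
    rw [List.perm_ext_iff_of_nodup (PySem.Set.nodup_ofList _) (PySem.Set.nodup_ofList _)]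
    intro a
    simp [PySem.Set.mem_ofList, List.mem_map, PySem.List.mem_sorted]
  rw [hkeys]
  unfold canon
  congr 1
  congr 1
  apply flatMap_congr_mem
  intro c _
  unfold canonBlock
  rw [filter_sorted_key]

-- ===== VERDICT (by name: the statement is the Claim_ definition above) =====
theorem fallback_inventory_markdown_py_spec : Claim_equal_fallback_inventory_markdown_py := by
  intro inventory _
  unfold Spec_fallback_inventory_markdown_py
  rw [a_canon, b_canon]
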